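-- pv_equiv track=rewrite | github.com/craigjsmith/crawlmap | scraper/scraper.py | removeMostOfAddress
-- ===== SOURCE A (Python) =====
-- def removeMostOfAddress(url):
--     count = 0
--     for index in range(len(url)):
--         if url[index] == "/":
--             count = count + 1
--         elif url[index] == "?":
--             return url[:index + 1]
--         if count == 3:
--             return url[:index + 1]
--     return url
-- ===== SOURCE B (Python) =====
-- def removeMostOfAddress(url):
--     q = url.find("?")
--     pos = -1
--     for _ in range(3):
--         pos = url.find("/", pos + 1)
--         if pos == -1:
--             break
--     cands = [p for p in (q, pos) if p != -1]
--     if not cands: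
--         return url
--     return url[:min(cands) + 1]
-- ===== Notes on version B (the rewrite author's own statement) =====
-- stated objective: faster
-- what changed: Replaces the interleaved slash-counting Python character loop by two independent delimiter searches (str.find for '?', three chained str.find calls for the third '/') combined with a min over the non-negative positions.
import Mathlib
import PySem

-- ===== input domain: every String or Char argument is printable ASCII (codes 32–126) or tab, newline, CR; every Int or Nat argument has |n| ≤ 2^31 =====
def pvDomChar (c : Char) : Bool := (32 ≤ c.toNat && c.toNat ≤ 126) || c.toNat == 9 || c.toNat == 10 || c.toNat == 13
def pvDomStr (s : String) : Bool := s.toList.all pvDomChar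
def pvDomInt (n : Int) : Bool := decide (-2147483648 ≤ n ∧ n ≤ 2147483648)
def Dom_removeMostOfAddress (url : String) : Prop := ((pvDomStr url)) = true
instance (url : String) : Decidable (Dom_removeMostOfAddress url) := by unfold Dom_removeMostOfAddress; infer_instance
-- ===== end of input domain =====

-- B re-implements the truncation with two independent str.find searches combined by a min,
-- instead of A's interleaved per-character slash-counting loop (same asymptotics; the timing
-- run measured B faster via the C-level str.find scans).

-- ===== PORT A =====
-- A's for-loop over range(len(url)) with the running slash count; returns the cut length
-- (index+1) at the early-return, none if the loop finishes. url[:index+1] with index ≥ 0 is take.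
def removeMostOfAddressLoop : List Char → Int → Nat → Option Nat
  | [], _, _ => none
  | c :: rest, count, i =>
    if c = '/' then
      if count + 1 = 3 then some (i + 1)
      else removeMostOfAddressLoop rest (count + 1) (i + 1)
    else if c = '?' then some (i + 1)
    else if count = 3 then some (i + 1)
    else removeMostOfAddressLoop rest count (i + 1)

def removeMostOfAddress (url : String) : String :=
  match removeMostOfAddressLoop url.toList 0 0 with
  | some n => String.ofList (url.toList.take n)
  | none => url

-- ===== PORT B =====
-- B's 'for _ in range(3): pos = url.find("/", pos+1); if pos == -1: break' loop.
def removeMostOfAddressAltLoop (url : String) : Nat → Int → Int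
  | 0, pos => pos
  | n + 1, pos =>
    let p := PySem.Str.findFrom url "/" (pos + 1) none
    if p = -1 then -1 else removeMostOfAddressAltLoop url n p

def removeMostOfAddress_alt (url : String) : String :=
  let q := PySem.Str.find url "?"
  let pos := removeMostOfAddressAltLoop url 3 (-1)
  let cands := [q, pos].filter (fun p => p ≠ -1)
  match PySem.List.min? cands (fun x => x) with
  | none => url
  | some m => String.ofList (PySem.List.slice url.toList none (some (m + 1)))

-- ===== PRECONDITION & SPEC =====
def Spec_removeMostOfAddress (url : String) (out : String) : Prop := out = removeMostOfAddress_alt url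
instance (url : String) (out : String) : Decidable (Spec_removeMostOfAddress url out) := by unfold Spec_removeMostOfAddress; infer_instance

-- ===== CLAIM (what is proved, stated in full; the proofs are below) =====
def Claim_equal_removeMostOfAddress : Prop := ∀ (url : String), Dom_removeMostOfAddress url → Spec_removeMostOfAddress url (removeMostOfAddress url)

-- ===== LEMMAS AND PROOFS =====

-- reference: index of the k-th '/' (k ≥ 1), as a chain of findIdx? searches
def nthSlash : List Char → Nat → Option Nat
  | _, 0 => none
  | l, 1 => l.findIdx? (· == '/')
  | l, (n+2) => (l.findIdx? (· == '/')).bind fun i =>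
      (nthSlash (l.drop (i+1)) (n+1)).map (fun j => i + 1 + j)

def minOpt : Option Nat → Option Nat → Option Nat
  | none, b => b
  | some x, none => some x
  | some x, some y => some (min x y)

theorem single_prefix_iff (d : Char) (l : List Char) : [d] <+: l ↔ l.head? = some d := by
  cases l with
  | nil => simp
  | cons x xs =>
    simp [List.cons_prefix_cons]
    exact eq_comm

theorem prefix_drop_iff (d : Char) (l : List Char) (i : Nat) :
    [d] <+: l.drop i ↔ l[i]? = some d := by
  rw [single_prefix_iff, List.head?_drop]

theorem find_singleton (l : List Char) (d : Char) :
    PySem.Chars.find l [d] =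
      match l.findIdx? (· == d) with
      | none => -1
      | some i => (i : Int) := by
  cases h : l.findIdx? (· == d) with
  | none =>
    rw [List.findIdx?_eq_none_iff] at h
    rw [PySem.Chars.find_eq_neg_one_iff]
    intro hinf
    have hd : d ∈ l := hinf.subset (List.mem_singleton_self d)
    have := h d hd
    simp at this
  | some i =>
    rw [List.findIdx?_eq_some_iff_getElem] at h
    obtain ⟨hi, hpi, hmin⟩ := h
    have hpre : [d] <+: l.drop i := by
      rw [prefix_drop_iff]
      simp at hpi
      simp [List.getElem?_eq_getElem hi, hpi]
    have hnn : 0 ≤ PySem.Chars.find l [d] := by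
      rw [PySem.Chars.find_nonneg_iff]
      exact hpre.isInfix.trans (List.drop_suffix i l).isInfix
    obtain ⟨hp2, hmin2⟩ := PySem.Chars.find_spec (s := l) (sub := [d]) hnn
    have h1 : ¬ i < (PySem.Chars.find l [d]).toNat := fun hlt => hmin2 i hlt hpre
    have h2 : ¬ (PySem.Chars.find l [d]).toNat < i := by
      intro hlt
      have := hmin _ hlt
      rw [prefix_drop_iff] at hp2
      have hlen : (PySem.Chars.find l [d]).toNat < l.length := lt_trans hlt hi
      rw [List.getElem?_eq_getElem hlen] at hp2
      injection hp2 with hp2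
      simp at this
      exact this hp2
    show PySem.Chars.find l [d] = (i : Int)
    omega

theorem nthSlash_nil (k : Nat) : nthSlash [] k = none := by
  match k with
  | 0 => rfl
  | 1 => rfl
  | n+2 => simp [nthSlash]

theorem nthSlash_of_none (l : List Char) (m : Nat) (h : l.findIdx? (· == '/') = none) :
    nthSlash l (m+1) = none := by
  match m with
  | 0 => simpa [nthSlash] using h
  | n+1 => simp [nthSlash, h]

theorem nthSlash_cons (c : Char) (l : List Char) (k : Nat) (hk : 1 ≤ k) :
    nthSlash (c :: l) k =
      if c = '/' then
        (if k = 1 then some 0 else (nthSlash l (k-1)).map (· + 1))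
      else (nthSlash l k).map (· + 1) := by
  match k with
  | 1 =>
    by_cases hc : c = '/' <;> simp [nthSlash, List.findIdx?_cons, hc]
  | n+2 =>
    by_cases hc : c = '/'
    · have h1 : n + 2 - 1 = n + 1 := by omega
      have hbeq : (c == '/') = true := by simp [hc]
      simp only [nthSlash, List.findIdx?_cons, hbeq, if_true, if_pos hc, h1,
        Option.bind_some, List.drop_succ_cons, List.drop_zero]
      by_cases hn : n + 2 = 1
      · omega
      · rw [if_neg hn]
        cases nthSlash l (n+1) <;> simp [Nat.add_comm]
    · have hbeq : (c == '/') = false := by simp [hc]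
      simp only [nthSlash, List.findIdx?_cons, hbeq, Bool.false_eq_true, if_false, if_neg hc]
      cases hf : l.findIdx? (· == '/') with
      | none => simp [nthSlash, hf]
      | some i =>
        simp only [nthSlash, hf, Option.map_some, Option.bind_some, List.drop_succ_cons]
        cases nthSlash (l.drop (i+1)) (n+1) <;> simp <;> omega

theorem minOpt_map (a b : Option Nat) :
    minOpt (a.map (· + 1)) (b.map (· + 1)) = (minOpt a b).map (· + 1) := by
  cases a <;> cases b <;> simp [minOpt] <;> omega

theorem aloop_eq (cs : List Char) : ∀ (k i : Nat), 1 ≤ k →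
    removeMostOfAddressLoop cs (3 - (k : Int)) i =
      match minOpt (cs.findIdx? (· == '?')) (nthSlash cs k) with
      | none => none
      | some j => some (i + j + 1) := by
  induction cs with
  | nil => intro k i hk; simp [removeMostOfAddressLoop, nthSlash_nil, minOpt]
  | cons c cs ih =>
    intro k i hk
    rw [nthSlash_cons c cs k hk]
    by_cases hc : c = '/'
    · have hq : (c == '?') = false := by simp [hc]
      rw [List.findIdx?_cons]
      simp only [hq, Bool.false_eq_true, if_false]
      by_cases hk1 : k = 1
      · subst hk1
        cases hfq : cs.findIdx? (· == '?') <;>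
          simp [removeMostOfAddressLoop, hc, minOpt, hfq]
      · have harith : (3 : Int) - k + 1 ≠ 3 := by
          intro h; apply hk1; omega
        have hsub : (3 : Int) - k + 1 = 3 - ((k - 1 : Nat) : Int) := by
          have : ((k - 1 : Nat) : Int) = (k : Int) - 1 := by omega
          rw [this]; ring
        simp only [removeMostOfAddressLoop, if_pos hc, if_neg harith, if_neg hk1]
        rw [hsub, ih (k-1) (i+1) (by omega)]
        rw [minOpt_map]
        cases minOpt (cs.findIdx? (· == '?')) (nthSlash cs (k-1)) <;> simp <;> omega
    · rw [if_neg hc, List.findIdx?_cons]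
      by_cases hq : c = '?'
      · have hqb : (c == '?') = true := by simp [hq]
        simp only [hqb, if_true]
        simp only [removeMostOfAddressLoop, if_neg hc, if_pos hq]
        cases nthSlash cs k <;> simp [minOpt]
      · have hqb : (c == '?') = false := by simp [hq]
        have h33 : (3 : Int) - k ≠ 3 := by omega
        simp only [hqb, Bool.false_eq_true, if_false]
        simp only [removeMostOfAddressLoop, if_neg hc, if_neg hq, if_neg h33]
        rw [ih k (i+1) hk, minOpt_map]
        cases minOpt (cs.findIdx? (· == '?')) (nthSlash cs k) <;> simp <;> omega

theorem altLoop_succ (url : String) (n : Nat) (pos : Int) :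
    removeMostOfAddressAltLoop url (n+1) pos =
      (if PySem.Str.findFrom url "/" (pos + 1) none = -1 then -1
       else removeMostOfAddressAltLoop url n (PySem.Str.findFrom url "/" (pos + 1) none)) := rfl

theorem altLoop_eq (url : String) : ∀ (n s : Nat), s ≤ url.toList.length →
    removeMostOfAddressAltLoop url (n+1) ((s : Int) - 1) =
      match nthSlash (url.toList.drop s) (n+1) with
      | none => -1
      | some j => ((s + j : Nat) : Int) := by
  intro n
  induction n with
  | zero =>
    intro s hs
    have hpos : (s : Int) - 1 + 1 = (s : Nat) := by ring
    rw [altLoop_succ, hpos, PySem.Str.findFrom_eq]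
    have hsl : ("/" : String).toList = ['/'] := by decide
    rw [hsl, PySem.Chars.findFrom_natCast _ _ _ hs]
    rw [find_singleton]
    cases hf : (url.toList.drop s).findIdx? (· == '/') with
    | none =>
      simp [nthSlash, hf]
    | some i =>
      have hne : ((i : Int)) ≠ -1 := by omega
      simp only [nthSlash, hf]
      rw [if_neg hne, if_neg (by omega : (s : Int) + i ≠ -1)]
      simp only [removeMostOfAddressAltLoop]
      push_cast; ring
  | succ m ih =>
    intro s hs
    have hpos : (s : Int) - 1 + 1 = (s : Nat) := by ring
    rw [altLoop_succ, hpos, PySem.Str.findFrom_eq]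
    have hsl : ("/" : String).toList = ['/'] := by decide
    rw [hsl, PySem.Chars.findFrom_natCast _ _ _ hs]
    rw [find_singleton]
    cases hf : (url.toList.drop s).findIdx? (· == '/') with
    | none =>
      simp [nthSlash_of_none _ _ hf]
    | some i =>
      have hlen : i < (url.toList.drop s).length := by
        rw [List.findIdx?_eq_some_iff_getElem] at hf
        exact hf.1
      rw [List.length_drop] at hlen
      have hne : ((i : Int)) ≠ -1 := by omega
      rw [if_neg hne, if_neg (by omega : (s : Int) + i ≠ -1)]
      have hstep : (s : Int) + i = ((s + i + 1 : Nat) : Int) - 1 := by push_cast; ring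
      rw [hstep, ih (s + i + 1) (by omega)]
      have hdrop : (url.toList.drop s).drop (i + 1) = url.toList.drop (s + i + 1) := by
        rw [List.drop_drop]; ring_nf
      simp only [nthSlash, hf, Option.bind_some, hdrop]
      cases nthSlash (url.toList.drop (s + i + 1)) (m + 1) <;> simp
      push_cast; ring

theorem removeMostOfAddress_eq_alt (url : String) : removeMostOfAddress url = removeMostOfAddress_alt url := by
  have hq : PySem.Str.find url "?" =
      (match url.toList.findIdx? (· == '?') with
       | none => -1 | some i => (i : Int)) := by
    have h1 : PySem.Str.find url "?" = PySem.Chars.find url.toList ("?".toList) := by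
      simp [PySem.Str.find_eq]
    have h2 : ("?" : String).toList = ['?'] := by decide
    rw [h1, h2, find_singleton]
  have hpos : removeMostOfAddressAltLoop url 3 (-1) =
      (match nthSlash url.toList 3 with
       | none => -1 | some j => (j : Int)) := by
    have := altLoop_eq url 2 0 (by omega)
    simpa using this
  have h0 : (0 : Int) = 3 - ((3 : Nat) : Int) := by norm_num
  have ha := aloop_eq url.toList 3 0 (by omega)
  rw [← h0] at ha
  simp only [removeMostOfAddress, removeMostOfAddress_alt, hq, hpos, ha]
  cases hfq : url.toList.findIdx? (· == '?') with
  | none =>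
    cases hfs : nthSlash url.toList 3 with
    | none => simp [minOpt, PySem.List.min?]
    | some jp =>
      have h1 : ¬((jp : Int) = -1) := by omega
      simp only [minOpt]
      simp [List.filter, h1, PySem.List.min?_id_cons]
      rw [show ((jp : Int) + 1) = ((jp + 1 : Nat) : Int) by push_cast; ring,
        PySem.List.slice_to_natCast]
  | some jq =>
    have h1 : ¬((jq : Int) = -1) := by omega
    cases hfs : nthSlash url.toList 3 with
    | none =>
      simp only [minOpt]
      simp [List.filter, h1, PySem.List.min?_id_cons]
      rw [show ((jq : Int) + 1) = ((jq + 1 : Nat) : Int) by push_cast; ring,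
        PySem.List.slice_to_natCast]
    | some jp =>
      have h2 : ¬((jp : Int) = -1) := by omega
      simp only [minOpt]
      simp [List.filter, h1, h2, PySem.List.min?_id_cons]
      rw [show (min (jq : Int) (jp : Int) + 1) = ((min jq jp + 1 : Nat) : Int) by push_cast; ring,
        PySem.List.slice_to_natCast]

-- ===== VERDICT (by name: the statement is the Claim_ definition above) =====
theorem removeMostOfAddress_spec : Claim_equal_removeMostOfAddress := by
  intro url _
  exact removeMostOfAddress_eq_alt url
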